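-- pv_equiv track=rewrite | github.com/fmantis77/LOTTO | lotto.py | generate
-- ===== SOURCE A (Python) =====
-- def generate(listnum,steps):
-- 	num=[]
-- 	start=1;stop=1;cpt=0
-- 	for i in listnum:
-- 		if start<=steps:
-- 			num=num+[listnum[cpt]]
-- 			start=start+1
-- 			stop=1
-- 		else:
-- 			if stop<=steps:
-- 				stop=stop+1
-- 			else:
-- 				start=1
--
-- 		cpt=cpt+1
-- 	return num
-- ===== SOURCE B (Python) =====
-- def generate(listnum, steps):
--     if steps <= 0:
--         return []
--     period = 2 * steps + 1
--     return [x for j, x in enumerate(listnum) if j % period < steps]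
-- ===== Notes on version B (the rewrite author's own statement) =====
-- stated objective: simpler
-- what changed: Replaced the start/stop/cpt counter state machine by a stateless index test: element j is kept iff j % (2*steps+1) < steps; steps <= 0 returns [] directly.
import Mathlib
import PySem

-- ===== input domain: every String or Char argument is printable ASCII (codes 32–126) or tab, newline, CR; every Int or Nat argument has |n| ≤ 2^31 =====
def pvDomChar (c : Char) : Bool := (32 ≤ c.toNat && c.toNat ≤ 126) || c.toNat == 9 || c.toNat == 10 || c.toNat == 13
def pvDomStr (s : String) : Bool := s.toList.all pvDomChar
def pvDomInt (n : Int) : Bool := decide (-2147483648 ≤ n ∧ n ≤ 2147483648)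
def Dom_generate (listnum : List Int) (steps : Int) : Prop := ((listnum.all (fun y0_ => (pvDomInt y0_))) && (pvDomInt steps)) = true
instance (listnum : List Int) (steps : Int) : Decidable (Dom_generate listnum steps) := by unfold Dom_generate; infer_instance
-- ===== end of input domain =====

-- B replaces A's running start/stop counter state machine by the stateless index test j % (2*steps+1) < steps (simpler).

-- ===== PORT A =====
-- A's loop body; cpt is always a valid index while the loop runs, so pyGetD's default is never used
def pyStepA (listnum : List Int) (steps : Int)
    (st : List Int × Int × Int × Int) (_i : Int) : List Int × Int × Int × Int :=
  match st with
  | (num, start, stop, cpt) =>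
    if start ≤ steps then
      (num ++ [PySem.List.pyGetD listnum cpt 0], start + 1, 1, cpt + 1)
    else if stop ≤ steps then
      (num, start, stop + 1, cpt + 1)
    else
      (num, 1, stop, cpt + 1)

def generate (listnum : List Int) (steps : Int) : List Int :=
  (listnum.foldl (pyStepA listnum steps) ([], 1, 1, 0)).1

-- ===== PORT B =====
def generate_alt (listnum : List Int) (steps : Int) : List Int :=
  if steps ≤ 0 then []
  else
    ((PySem.List.enumerate listnum 0).filter
      (fun jx => decide (PySem.Int.mod jx.1 (2 * steps + 1) < steps))).map (fun jx => jx.2)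

-- ===== PRECONDITION & SPEC =====
def Spec_generate (listnum : List Int) (steps : Int) (out : List Int) : Prop := out = generate_alt listnum steps
instance (listnum : List Int) (steps : Int) (out : List Int) : Decidable (Spec_generate listnum steps out) := by unfold Spec_generate; infer_instance

-- ===== CLAIM (what is proved, stated in full; the proofs are below) =====
def Claim_equal_generate : Prop := ∀ (listnum : List Int) (steps : Int), Dom_generate listnum steps → Spec_generate listnum steps (generate listnum steps)

-- ===== LEMMAS AND PROOFS =====

theorem emod_succ_of_lt (c p : Int) (hp : 0 < p) (h : c % p + 1 < p) :
    (c + 1) % p = c % p + 1 := by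
  have h0 : 0 ≤ c % p := Int.emod_nonneg c (by omega)
  have h1 : (1:Int) % p = 1 := Int.emod_eq_of_lt (by omega) (by omega)
  rw [Int.add_emod, h1, Int.emod_eq_of_lt (by omega) (by omega)]

theorem emod_succ_wrap (c p : Int) (hp : 1 < p) (h : c % p = p - 1) :
    (c + 1) % p = 0 := by
  have h1 : (1:Int) % p = 1 := Int.emod_eq_of_lt (by omega) (by omega)
  have h2 : p - 1 + 1 = p := by omega
  rw [Int.add_emod, h, h1, h2, Int.emod_self]

-- steps ≤ 0: A never appends (start and stop stay 1)
theorem foldlA_nonpos (listnum : List Int) (steps : Int) (hs : steps ≤ 0) :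
    ∀ (l : List Int) (num : List Int) (c : Int),
      (l.foldl (pyStepA listnum steps) (num, 1, 1, c)).1 = num := by
  intro l
  induction l with
  | nil => intro num c; rfl
  | cons x l ih =>
    intro num c
    have h1 : ¬ ((1:Int) ≤ steps) := by omega
    simp only [List.foldl_cons, pyStepA, if_neg h1]
    exact ih num (c + 1)

-- the invariant of A's loop for steps ≥ 1, with period p = 2*steps+1
theorem foldlA_pos (listnum : List Int) (steps : Int) (hs : 1 ≤ steps) :
    ∀ (l : List Int) (c : Int) (num : List Int) (start stop : Int),
      0 ≤ c →
      ((c % (2*steps+1) < steps ∧ start = c % (2*steps+1) + 1) ∨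
       (steps ≤ c % (2*steps+1) ∧ start = steps + 1 ∧ stop = c % (2*steps+1) - steps + 1)) →
      (l.foldl (pyStepA listnum steps) (num, start, stop, c)).1 =
        num ++ ((PySem.List.pyRange c (c + l.length) 1).filter
                  (fun j => decide (PySem.Int.mod j (2*steps+1) < steps))).map
                 (fun j => PySem.List.pyGetD listnum j 0) := by
  intro l
  induction l with
  | nil =>
    intro c num start stop hc _
    simp [PySem.List.pyRange_one_eq_nil (le_refl c)]
  | cons x l ih =>
    intro c num start stop hc hst
    have hp : (0:Int) < 2*steps+1 := by omega
    have hmodlt : c % (2*steps+1) < 2*steps+1 := Int.emod_lt_of_pos c hp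
    have hmodnn : 0 ≤ c % (2*steps+1) := Int.emod_nonneg c (by omega)
    have hlen : (0:Int) ≤ (l.length : Int) := by positivity
    have hrange : PySem.List.pyRange c (c + ((x::l).length : Nat)) 1
        = c :: PySem.List.pyRange (c+1) (c + ((x::l).length : Nat)) 1 := by
      apply PySem.List.pyRange_one_cons; simp only [List.length_cons]; push_cast; omega
    have hend : (c : Int) + (((x::l).length : Nat) : Int) = (c+1) + ((l.length : Nat) : Int) := by
      simp; omega
    have hmodc : PySem.Int.mod c (2*steps+1) = c % (2*steps+1) :=
      PySem.Int.mod_eq_emod_of_pos hp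
    rcases hst with ⟨hr, hstart⟩ | ⟨hr, hstart, hstop⟩
    · -- append branch: start ≤ steps
      have hle : start ≤ steps := by omega
      have hsucc : (c+1) % (2*steps+1) = c % (2*steps+1) + 1 :=
        emod_succ_of_lt c _ hp (by omega)
      have hq : decide (PySem.Int.mod c (2*steps+1) < steps) = true := by
        rw [hmodc]; exact decide_eq_true hr
      simp only [List.foldl_cons, pyStepA, if_pos hle]
      rw [ih (c+1) (num ++ [PySem.List.pyGetD listnum c 0]) (start+1) 1 (by omega)
            (by rcases lt_or_ge (c % (2*steps+1) + 1) steps with h | h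
                · exact Or.inl ⟨by omega, by omega⟩
                · exact Or.inr ⟨by omega, by omega, by omega⟩)]
      rw [hrange, hend]
      simp [hq]
    · -- skip branch: start = steps + 1 > steps
      have hgt : ¬ (start ≤ steps) := by omega
      have hq : decide (PySem.Int.mod c (2*steps+1) < steps) = false := by
        rw [hmodc]; exact decide_eq_false (by omega)
      simp only [List.foldl_cons, pyStepA, if_neg hgt]
      rw [hrange, hend]
      by_cases hstop2 : stop ≤ steps
      · have hsucc : (c+1) % (2*steps+1) = c % (2*steps+1) + 1 :=
          emod_succ_of_lt c _ hp (by omega)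
        rw [if_pos hstop2,
            ih (c+1) num start (stop+1) (by omega)
              (Or.inr ⟨by omega, by omega, by omega⟩)]
        simp [hq]
      · have hwrap : (c+1) % (2*steps+1) = 0 :=
          emod_succ_wrap c _ (by omega) (by omega)
        rw [if_neg hstop2,
            ih (c+1) num 1 stop (by omega)
              (Or.inl ⟨by omega, by omega⟩)]
        simp [hq]

-- ===== VERDICT (by name: the statement is the Claim_ definition above) =====
theorem generate_spec : Claim_equal_generate := by
  intro listnum steps _hdom
  unfold Spec_generate generate generate_alt
  by_cases hs : steps ≤ 0
  · rw [if_pos hs, foldlA_nonpos listnum steps hs listnum [] 0]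
  · rw [if_neg hs]
    have hs1 : (1:Int) ≤ steps := by omega
    rw [foldlA_pos listnum steps hs1 listnum 0 [] 1 1 (le_refl 0)
          (Or.inl ⟨by simp; omega, by simp⟩)]
    rw [PySem.List.enumerate_eq_map_pyRange listnum 0, List.filter_map, List.map_map]
    simp only [Function.comp_def]
    simp
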